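-- pv_equiv track=rewrite | github.com/posl/comment_recommendation | script/split_gen/2_time/ja/129_C/8.py | calc
-- ===== SOURCE A (Python) =====
-- def calc(N, M, A):
--     MOD = 10**9 + 7
--     dp = [0] * (N+1)
--     dp[0] = 1
--     for i in range(1, N+1):
--         if i in A:
--             dp[i] = 0
--         else:
--             dp[i] = dp[i-1] + dp[i-2]
--             dp[i] %= MOD
--     return dp[N]
-- ===== SOURCE B (Python) =====
-- MOD = 10**9 + 7
--
-- def _fib_pair(n):
--     # (F(n) % MOD, F(n+1) % MOD) by fast doubling; n >= 0
--     if n == 0: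
--         return (0, 1)
--     a, b = _fib_pair(n // 2)
--     c = a * (2 * b - a) % MOD
--     d = (a * a + b * b) % MOD
--     if n % 2 == 1:
--         return (d, (c + d) % MOD)
--     return (c, d)
--
-- def calc(N, M, A):
--     # answer = product over allowed runs of Fibonacci numbers:
--     # F(b1) * F(b2-b1-1) * ... * F(N-bk) (mod MOD), F(N+1) if no broken step
--     broken = sorted({x for x in A if 1 <= x <= N})
--     ans = 1
--     prev = None
--     for b in broken:
--         gap = b if prev is None else b - prev - 1
--         ans = ans * _fib_pair(gap)[0] % MOD
--         prev = b
--     last = N + 1 if prev is None else N - prev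
--     return ans * _fib_pair(last)[0] % MOD
-- ===== Notes on version B (the rewrite author's own statement) =====
-- stated objective: faster
-- what changed: Instead of filling a dp array of size N+1 with an O(M) membership scan per step, B sorts the distinct broken steps in [1,N] and returns the product of Fibonacci numbers of the allowed-run lengths between them, each computed mod 1e9+7 by fast doubling.
import Mathlib
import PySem

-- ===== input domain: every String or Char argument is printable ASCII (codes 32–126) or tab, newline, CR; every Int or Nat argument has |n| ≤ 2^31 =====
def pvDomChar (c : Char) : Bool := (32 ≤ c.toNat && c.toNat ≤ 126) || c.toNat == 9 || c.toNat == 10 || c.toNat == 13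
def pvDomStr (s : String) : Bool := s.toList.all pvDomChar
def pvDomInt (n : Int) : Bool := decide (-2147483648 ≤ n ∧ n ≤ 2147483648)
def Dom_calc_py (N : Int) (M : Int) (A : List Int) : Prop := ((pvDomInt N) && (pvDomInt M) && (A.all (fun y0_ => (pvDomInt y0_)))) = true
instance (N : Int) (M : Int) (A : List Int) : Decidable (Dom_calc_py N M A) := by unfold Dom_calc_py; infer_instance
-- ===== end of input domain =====

-- B replaces A's O(N*M) dp-array loop by the product of Fibonacci numbers of the
-- allowed-run lengths between the sorted broken steps, each computed by fast doubling mod 1e9+7.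

-- ===== PORT A =====
def calc_py (N : Int) (M : Int) (A : List Int) : Int :=
  let MOD : Int := 10 ^ 9 + 7
  let dp : List Int := List.replicate (N + 1).toNat 0      -- [0] * (N+1)
  let dp := PySem.List.pySetD dp 0 1                        -- dp[0] = 1 (IndexError when N < 0: outside Pre_)
  let dp := (PySem.List.pyRange 1 (N + 1) 1).foldl (fun dp i =>
      if A.contains i then
        PySem.List.pySetD dp i 0
      else
        -- dp[i] = dp[i-1] + dp[i-2]; dp[i] %= MOD   (dp[-1] at i=1: negative-index read)
        PySem.List.pySetD dp i
          (PySem.Int.mod (PySem.List.pyGetD dp (i - 1) 0 + PySem.List.pyGetD dp (i - 2) 0) MOD)) dp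
  PySem.List.pyGetD dp N 0

-- ===== PORT B =====
def pyMOD : Int := 10 ^ 9 + 7

-- _fib_pair(n): (F(n) % MOD, F(n+1) % MOD) by fast doubling; B only calls it with n >= 0,
-- so the Nat argument is exact on every reached call.
def fibPairB (n : Nat) : Int × Int :=
  if h : n = 0 then (0, 1)
  else
    let p := fibPairB (n / 2)
    let c := PySem.Int.mod (p.1 * (2 * p.2 - p.1)) pyMOD
    let d := PySem.Int.mod (p.1 * p.1 + p.2 * p.2) pyMOD
    if n % 2 = 1 then (d, PySem.Int.mod (c + d) pyMOD) else (c, d)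
termination_by n
decreasing_by exact Nat.div_lt_self (Nat.pos_of_ne_zero h) (by omega)

def calc_py_alt (N : Int) (M : Int) (A : List Int) : Int :=
  let broken := PySem.List.sorted
      (PySem.Set.ofList (A.filter (fun x => decide (1 ≤ x ∧ x ≤ N)))) (fun x => x) false
  let st := broken.foldl (fun (s : Int × Option Int) b =>
      let gap : Int := match s.2 with | none => b | some p => b - p - 1
      (PySem.Int.mod (s.1 * (fibPairB gap.toNat).1) pyMOD, some b)) ((1 : Int), (none : Option Int))
  let last : Int := match st.2 with | none => N + 1 | some p => N - p
  PySem.Int.mod (st.1 * (fibPairB last.toNat).1) pyMOD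

-- ===== PRECONDITION & SPEC =====
-- A raises IndexError (dp[0] = 1 on an empty list) exactly when N < 0.
def Pre_calc_py (N : Int) (M : Int) (A : List Int) : Prop := 0 ≤ N
instance (N : Int) (M : Int) (A : List Int) : Decidable (Pre_calc_py N M A) := by unfold Pre_calc_py; infer_instance
def pvWitness_calc_py : Int × Int × List Int := (5, 1, [2, 4])

def Spec_calc_py (N : Int) (M : Int) (A : List Int) (out : Int) : Prop := out = calc_py_alt N M A
instance (N : Int) (M : Int) (A : List Int) (out : Int) : Decidable (Spec_calc_py N M A out) := by unfold Spec_calc_py; infer_instance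

-- ===== CLAIM (what is proved, stated in full; the proofs are below) =====
def Claim_equal_calc_py : Prop := ∀ (N : Int) (M : Int) (A : List Int), Dom_calc_py N M A → Pre_calc_py N M A → Spec_calc_py N M A (calc_py N M A)

-- ===== LEMMAS AND PROOFS =====

-- pair form of A's loop body: state = (dp[i-1], dp[i])
def stpA (A : List Int) (s : Int × Int) (i : Int) : Int × Int :=
  if A.contains i then (s.2, 0) else (s.2, (s.2 + s.1) % (1000000007 : Int))

-- A's loop body on the dp array (definitionally the lambda inside calc_py)
def bodyA (A : List Int) (dp : List Int) (i : Int) : List Int :=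
  if A.contains i then
    PySem.List.pySetD dp i 0
  else
    PySem.List.pySetD dp i
      (PySem.Int.mod (PySem.List.pyGetD dp (i - 1) 0 + PySem.List.pyGetD dp (i - 2) 0) (10 ^ 9 + 7))

-- proof-side rendering of B's loop-plus-final, structural in the broken list
def Bloop (N : Int) (bs : List Int) (ans : Int) (prev : Option Int) : Int :=
  match bs with
  | [] => PySem.Int.mod (ans * (fibPairB (match prev with | none => N + 1 | some p => N - p).toNat).1) pyMOD
  | b :: rest => Bloop N rest
      (PySem.Int.mod (ans * (fibPairB (match prev with | none => b | some p => b - p - 1).toNat).1) pyMOD) (some b)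

def fibI (n : Nat) : Int := (Nat.fib n : Int)

lemma base_mod (x : Int) : (x % 1000000007) ≡ x [ZMOD 1000000007] := Int.emod_emod_of_dvd x dvd_rfl

lemma modP_mul_right (a b : Int) : (a * (b % 1000000007)) % 1000000007 = (a * b) % 1000000007 := by
  conv_rhs => rw [Int.mul_emod]
  rw [Int.mul_emod, Int.emod_emod_of_dvd _ dvd_rfl]

lemma pyMOD_emod (x : Int) : PySem.Int.mod x pyMOD = x % 1000000007 := by
  rw [PySem.Int.mod_eq_emod_of_pos (by norm_num [pyMOD])]; norm_num [pyMOD]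

lemma fibPairB_eq (n : Nat) :
    fibPairB n = (fibI n % 1000000007, fibI (n + 1) % 1000000007) := by
  induction n using Nat.strong_induction_on with
  | _ n ih =>
    rw [fibPairB]
    by_cases h : n = 0
    · subst h; norm_num [fibI]
    · have hlt : n / 2 < n := Nat.div_lt_self (Nat.pos_of_ne_zero h) (by omega)
      rw [dif_neg h, ih (n / 2) hlt]
      set k := n / 2 with hk
      set x := fibI k with hxd
      set y := fibI (k + 1) with hyd
      have hfle : Nat.fib k ≤ 2 * Nat.fib (k + 1) :=
        le_trans (Nat.fib_le_fib_succ) (by omega)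
      have h2k : fibI (2 * k) = x * (2 * y - x) := by
        rw [hxd, hyd]; unfold fibI
        rw [Nat.fib_two_mul, Nat.cast_mul, Nat.cast_sub hfle]; push_cast; ring
      have h2k1 : fibI (2 * k + 1) = x * x + y * y := by
        rw [hxd, hyd]; unfold fibI
        rw [Nat.fib_two_mul_add_one]; push_cast; ring
      have hc : PySem.Int.mod ((x % 1000000007) * (2 * (y % 1000000007) - (x % 1000000007))) pyMOD
          = fibI (2 * k) % 1000000007 := by
        rw [pyMOD_emod, h2k]
        exact (base_mod x).mul (((Int.ModEq.refl 2).mul (base_mod y)).sub (base_mod x))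
      have hd : PySem.Int.mod ((x % 1000000007) * (x % 1000000007) + (y % 1000000007) * (y % 1000000007)) pyMOD
          = fibI (2 * k + 1) % 1000000007 := by
        rw [pyMOD_emod, h2k1]
        exact (((base_mod x).mul (base_mod x)).add ((base_mod y).mul (base_mod y)))
      simp only
      rw [hc, hd]
      by_cases hpar : n % 2 = 1
      · rw [if_pos hpar]
        have hn : n = 2 * k + 1 := by omega
        have hsum : (fibI (2 * k) % 1000000007 + fibI (2 * k + 1) % 1000000007) % 1000000007
            = fibI (2 * k + 2) % 1000000007 := by
          have : fibI (2 * k + 2) = fibI (2 * k) + fibI (2 * k + 1) := by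
            unfold fibI; rw [Nat.fib_add_two]; push_cast; ring
          rw [this]
          exact (base_mod _).add (base_mod _)
        rw [pyMOD_emod, hsum, hn]
      · rw [if_neg hpar]
        have hn : n = 2 * k := by omega
        rw [hn]

lemma run2 (A : List Int) (L : Nat) (a x y : Int)
    (hy : 0 ≤ y) (hy' : y < 1000000007)
    (hclean : ∀ i : Int, a < i → i ≤ a + L → A.contains i = false) :
    ((PySem.List.pyRange (a + 1) (a + 1 + L) 1).foldl (stpA A) (x, y)).2
      = (x * fibI L + y * fibI (L + 1)) % 1000000007 := by
  induction L generalizing a x y with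
  | zero =>
    rw [PySem.List.pyRange_one_eq_nil (by push_cast; omega)]
    simp [fibI]
    omega
  | succ L ih =>
    rw [PySem.List.pyRange_one_cons (by push_cast; omega)]
    simp only [List.foldl_cons]
    have hb : A.contains (a + 1) = false := hclean (a + 1) (by omega) (by push_cast; omega)
    rw [stpA, hb]
    simp only [Bool.false_eq_true, if_false]
    have hrange : a + 1 + ((L + 1 : Nat) : Int) = (a + 1) + 1 + (L : Nat) := by push_cast; ring
    rw [hrange, ih (a + 1) y ((y + x) % 1000000007)
      (Int.emod_nonneg _ (by norm_num)) (Int.emod_lt_of_pos _ (by norm_num))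
      (fun i h1 h2 => hclean i (by omega) (by push_cast at h2 ⊢; omega))]
    have hmod : (y * fibI L + (y + x) % 1000000007 * fibI (L + 1))
        ≡ (x * fibI (L + 1) + y * fibI (L + 1 + 1)) [ZMOD 1000000007] := by
      have h1 : (y * fibI L + (y + x) % 1000000007 * fibI (L + 1))
          ≡ (y * fibI L + (y + x) * fibI (L + 1)) [ZMOD 1000000007] :=
        Int.ModEq.add (Int.ModEq.refl _) ((base_mod _).mul (Int.ModEq.refl _))
      have h2 : y * fibI L + (y + x) * fibI (L + 1) = x * fibI (L + 1) + y * fibI (L + 1 + 1) := by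
        have : fibI (L + 1 + 1) = fibI L + fibI (L + 1) := by
          unfold fibI; rw [Nat.fib_add_two]; push_cast; ring
        rw [this]; ring
      rw [h2] at h1; exact h1
    exact hmod

lemma chain (A : List Int) (N : Int) (bs : List Int) (b0 ans : Int)
    (hp : bs.Pairwise (· < ·))
    (hbs : ∀ b ∈ bs, b0 < b ∧ b ≤ N)
    (hmem : ∀ i : Int, b0 < i → i ≤ N → (A.contains i = true ↔ i ∈ bs))
    (hb0 : 0 ≤ b0) (hbN : b0 ≤ N) :
    ((PySem.List.pyRange (b0 + 1) (N + 1) 1).foldl (stpA A) (ans, 0)).2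
      = Bloop N bs ans (some b0) := by
  induction bs generalizing b0 ans with
  | nil =>
    have hL : N + 1 = b0 + 1 + ((N - b0).toNat : Int) := by omega
    rw [hL, run2 A (N - b0).toNat b0 ans 0 le_rfl (by norm_num)
      (fun i h1 h2 => by
        have h3 : i ≤ N := by omega
        have := hmem i h1 h3
        simpa using this)]
    rw [Bloop, fibPairB_eq, pyMOD_emod, modP_mul_right]
    ring_nf
  | cons b rest ih =>
    have hb := hbs b (List.mem_cons_self ..)
    obtain ⟨hpb, hpt⟩ := List.pairwise_cons.mp hp
    have hcb : A.contains b = true := (hmem b hb.1 hb.2).mpr (List.mem_cons_self ..)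
    rw [PySem.List.pyRange_one_append (b0 + 1) (b + 1) (N + 1) (by omega) (by omega),
      List.foldl_append,
      PySem.List.pyRange_one_succ_right (by omega : b0 + 1 ≤ b),
      List.foldl_append]
    have hL : b = b0 + 1 + ((b - b0 - 1).toNat : Int) := by omega
    have hrun := run2 A (b - b0 - 1).toNat b0 ans 0 le_rfl (by norm_num)
      (fun i h1 h2 => by
        have h3 : i ≤ N := by omega
        have h4 : i < b := by omega
        have := hmem i h1 h3
        rcases hAc : A.contains i with _ | _
        · rfl
        · exfalso
          rcases List.mem_cons.mp (this.mp hAc) with h | h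
          · omega
          · exact absurd (hpb i h) (by omega))
    rw [← hL] at hrun
    simp only [List.foldl_cons, List.foldl_nil]
    rw [show stpA A ((PySem.List.pyRange (b0 + 1) b 1).foldl (stpA A) (ans, 0)) b
        = (((PySem.List.pyRange (b0 + 1) b 1).foldl (stpA A) (ans, 0)).2, 0) by
      rw [stpA, hcb]; simp]
    rw [hrun]
    have hsimp : (ans * fibI (b - b0 - 1).toNat + 0 * fibI ((b - b0 - 1).toNat + 1)) % 1000000007
        = (ans * fibI (b - b0 - 1).toNat) % 1000000007 := by ring_nf
    rw [hsimp]
    rw [ih b ((ans * fibI (b - b0 - 1).toNat) % 1000000007) hpt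
      (fun b' hb' => ⟨(hpb b' hb'), (hbs b' (List.mem_cons_of_mem _ hb')).2⟩)
      (fun i h1 h2 => by
        have := hmem i (by omega) h2
        rw [this, List.mem_cons]
        constructor
        · rintro (h | h)
          · omega
          · exact h
        · exact fun h => Or.inr h)
      (by omega) (by omega)]
    rw [Bloop, fibPairB_eq, pyMOD_emod, modP_mul_right]

lemma dpInv (A : List Int) (n : Nat) (k : Nat) (hk : k ≤ n) :
    (((PySem.List.pyRange 1 ((k : Int) + 1) 1).foldl (bodyA A)
        (PySem.List.pySetD (List.replicate (n + 1) (0 : Int)) 0 1)).length = n + 1)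
    ∧ (∀ j : Nat, k < j → j ≤ n →
        ((PySem.List.pyRange 1 ((k : Int) + 1) 1).foldl (bodyA A)
          (PySem.List.pySetD (List.replicate (n + 1) (0 : Int)) 0 1)).getD j 0 = 0)
    ∧ (((PySem.List.pyRange 1 ((k : Int) + 1) 1).foldl (bodyA A)
        (PySem.List.pySetD (List.replicate (n + 1) (0 : Int)) 0 1)).getD k 0
        = ((PySem.List.pyRange 1 ((k : Int) + 1) 1).foldl (stpA A) (0, 1)).2)
    ∧ (1 ≤ k →
      ((PySem.List.pyRange 1 ((k : Int) + 1) 1).foldl (bodyA A)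
        (PySem.List.pySetD (List.replicate (n + 1) (0 : Int)) 0 1)).getD (k - 1) 0
        = ((PySem.List.pyRange 1 ((k : Int) + 1) 1).foldl (stpA A) (0, 1)).1) := by
  induction k with
  | zero =>
    rw [show ((0 : Nat) : Int) + 1 = 1 by norm_num, PySem.List.pyRange_one_eq_nil le_rfl]
    simp only [List.foldl_nil]
    rw [PySem.List.pySetD_of_nonneg _ 1 (le_refl (0:Int))]
    refine ⟨by simp, ?_, ?_, by omega⟩
    · intro j h1 h2
      rw [List.getD_eq_getElem?_getD, List.getElem?_set, if_neg (by omega),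
        List.getElem?_replicate, if_pos (by omega)]
      rfl
    · rw [List.getD_eq_getElem?_getD, List.getElem?_set, if_pos (by simp), if_pos (by simp)]
      rfl
  | succ k ih =>
    have hk' : k ≤ n := by omega
    obtain ⟨ihlen, ihzero, ihk, ihk1⟩ := ih hk'
    rw [show ((k + 1 : Nat) : Int) + 1 = ((k : Int) + 1) + 1 by push_cast; ring,
      PySem.List.pyRange_one_succ_right (by omega)]
    simp only [List.foldl_append, List.foldl_cons, List.foldl_nil]
    set L := (PySem.List.pyRange 1 ((k : Int) + 1) 1).foldl (bodyA A)
        (PySem.List.pySetD (List.replicate (n + 1) (0 : Int)) 0 1) with hL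
    set s := (PySem.List.pyRange 1 ((k : Int) + 1) 1).foldl (stpA A) (0, 1) with hs
    -- the two reads in the else branch
    have hread1 : PySem.List.pyGetD L ((k : Int) + 1 - 1) 0 = s.2 := by
      rw [show (k : Int) + 1 - 1 = ((k : Nat) : Int) by ring, PySem.List.pyGetD_natCast]
      exact ihk
    have hread2 : PySem.List.pyGetD L ((k : Int) + 1 - 2) 0 = s.1 := by
      rcases Nat.eq_zero_or_pos k with hk0 | hk0
      · subst hk0
        rw [show ((0 : Nat) : Int) + 1 - 2 = -1 by norm_num]
        have hne : L ≠ [] := by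
          intro hc; rw [hc] at ihlen; simp at ihlen
        rw [PySem.List.pyGetD_neg_one L 0 hne]
        have hlast : L.getLast hne = L.getD n 0 := by
          rw [List.getLast_eq_getElem, List.getD_eq_getElem?_getD,
            List.getElem?_eq_getElem (by omega)]
          simp only [Option.getD_some]
          congr 1
          omega
        rw [hlast, ihzero n (by omega) le_rfl]
        -- s at k = 0 is (0, 1)
        rw [hs, show ((0 : Nat) : Int) + 1 = 1 by norm_num, PySem.List.pyRange_one_eq_nil le_rfl]
        simp
      · rw [show (k : Int) + 1 - 2 = ((k - 1 : Nat) : Int) by omega,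
          PySem.List.pyGetD_natCast]
        exact ihk1 hk0
    constructor
    · rw [bodyA]
      split
      · rw [PySem.List.pySetD_of_nonneg _ _ (show (0:Int) ≤ (k:Int) + 1 by positivity)]
        simp [ihlen]
      · rw [PySem.List.pySetD_of_nonneg _ _ (show (0:Int) ≤ (k:Int) + 1 by positivity)]
        simp [ihlen]
    · have htoNat : ((k : Int) + 1).toNat = k + 1 := by omega
      have hset : ∀ v : Int, PySem.List.pySetD L ((k : Int) + 1) v = L.set (k + 1) v := by
        intro v; rw [PySem.List.pySetD_of_nonneg _ v (show (0:Int) ≤ (k:Int) + 1 by positivity), htoNat]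
      refine ⟨?_, ?_, ?_⟩
      · intro j h1 h2
        rw [bodyA]
        split
        · rw [hset]
          rw [List.getD_eq_getElem?_getD, List.getElem?_set, if_neg (by omega),
            ← List.getD_eq_getElem?_getD]
          exact ihzero j (by omega) h2
        · rw [hset]
          rw [List.getD_eq_getElem?_getD, List.getElem?_set, if_neg (by omega),
            ← List.getD_eq_getElem?_getD]
          exact ihzero j (by omega) h2
      · rw [bodyA, stpA]
        split
        · rw [hset]
          rw [List.getD_eq_getElem?_getD, List.getElem?_set, if_pos rfl, if_pos (by omega)]
          rfl
        · rw [hset, hread1, hread2]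
          rw [List.getD_eq_getElem?_getD, List.getElem?_set, if_pos rfl, if_pos (by omega)]
          simp only [Option.getD_some]
          rw [PySem.Int.mod_eq_emod_of_pos (by norm_num)]
          norm_num
      · intro _
        rw [bodyA, stpA]
        have hkk : k + 1 - 1 = k := by omega
        split
        · rw [hset, hkk]
          rw [List.getD_eq_getElem?_getD, List.getElem?_set, if_neg (by omega),
            ← List.getD_eq_getElem?_getD]
          exact ihk
        · rw [hset, hkk]
          rw [List.getD_eq_getElem?_getD, List.getElem?_set, if_neg (by omega),
            ← List.getD_eq_getElem?_getD]
          exact ihk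

lemma calc_py_eq_pair (N M : Int) (A : List Int) (hN : 0 ≤ N) :
    calc_py N M A = ((PySem.List.pyRange 1 (N + 1) 1).foldl (stpA A) (0, 1)).2 := by
  obtain ⟨n, rfl⟩ : ∃ n : Nat, N = (n : Int) := ⟨N.toNat, (Int.toNat_of_nonneg hN).symm⟩
  obtain ⟨hlen, hzero, hk, hk1⟩ := dpInv A n n le_rfl
  have goal_eq : PySem.List.pyGetD
      ((PySem.List.pyRange 1 ((n : Int) + 1) 1).foldl (bodyA A)
        (PySem.List.pySetD (List.replicate (((n : Int) + 1)).toNat (0 : Int)) 0 1)) (n : Int) 0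
      = ((PySem.List.pyRange 1 ((n : Int) + 1) 1).foldl (stpA A) (0, 1)).2 := by
    rw [show (((n : Int)) + 1).toNat = n + 1 from by omega, PySem.List.pyGetD_natCast]
    exact hk
  exact goal_eq

lemma altfold (N : Int) (bs : List Int) (ans : Int) (prev : Option Int) :
    PySem.Int.mod
      ((bs.foldl (fun (s : Int × Option Int) b =>
          let gap : Int := match s.2 with | none => b | some p => b - p - 1
          (PySem.Int.mod (s.1 * (fibPairB gap.toNat).1) pyMOD, some b)) (ans, prev)).1
        * (fibPairB (match (bs.foldl (fun (s : Int × Option Int) b =>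
          let gap : Int := match s.2 with | none => b | some p => b - p - 1
          (PySem.Int.mod (s.1 * (fibPairB gap.toNat).1) pyMOD, some b)) (ans, prev)).2 with
            | none => N + 1 | some p => N - p).toNat).1) pyMOD
      = Bloop N bs ans prev := by
  induction bs generalizing ans prev with
  | nil => rfl
  | cons b rest ih =>
    simp only [List.foldl_cons]
    exact ih _ _

lemma alt_eq_Bloop (N M : Int) (A : List Int) :
    calc_py_alt N M A
      = Bloop N (PySem.List.sorted
          (PySem.Set.ofList (A.filter (fun x => decide (1 ≤ x ∧ x ≤ N)))) (fun x => x) false) 1 none := by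
  exact altfold N _ 1 none

-- ===== VERDICT (by name: the statement is the Claim_ definition above) =====
theorem calc_py_spec : Claim_equal_calc_py := by
  intro N M A hdom hpre
  have hN : 0 ≤ N := hpre
  unfold Spec_calc_py
  rw [calc_py_eq_pair N M A hN, alt_eq_Bloop]
  set s := PySem.List.sorted
      (PySem.Set.ofList (A.filter (fun x => decide (1 ≤ x ∧ x ≤ N)))) (fun x => x) false with hsdef
  have hsmem : ∀ x : Int, x ∈ s ↔ x ∈ A ∧ 1 ≤ x ∧ x ≤ N := by
    intro x
    rw [hsdef, PySem.List.mem_sorted, PySem.Set.mem_ofList, List.mem_filter]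
    simp
  have hspair : s.Pairwise (· < ·) := PySem.List.sorted_ofList_pairwise_lt _
  rcases hs : s with _ | ⟨b1, rest⟩
  · -- no broken steps in [1, N]
    have hrun := run2 A N.toNat 0 0 1 (by norm_num) (by norm_num)
        (fun i h1 h2 => by
          rcases hAc : A.contains i with _ | _
          · rfl
          · exfalso
            have hiA : i ∈ A := List.contains_iff_mem.mp hAc
            have : i ∈ s := (hsmem i).mpr ⟨hiA, by omega, by omega⟩
            rw [hs] at this
            exact absurd this (List.not_mem_nil))
    rw [show (0 : Int) + 1 + ((N.toNat : Nat) : Int) = N + 1 from by omega,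
      show (0 : Int) + 1 = 1 from by norm_num] at hrun
    rw [hrun, Bloop, fibPairB_eq, pyMOD_emod, modP_mul_right,
      show (N + 1).toNat = N.toNat + 1 from by omega]
    ring_nf
  · -- first broken step b1
    have hb1 := (hsmem b1).mp (by rw [hs]; exact List.mem_cons_self ..)
    rw [hs] at hspair
    obtain ⟨hpb, hpt⟩ := List.pairwise_cons.mp hspair
    rw [PySem.List.pyRange_one_append 1 (b1 + 1) (N + 1) (by omega) (by omega),
      List.foldl_append, PySem.List.pyRange_one_succ_right (by omega : (1:Int) ≤ b1)]
    simp only [List.foldl_append, List.foldl_cons, List.foldl_nil]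
    have hrun := run2 A (b1 - 1).toNat 0 0 1 (by norm_num) (by norm_num)
      (fun i h1 h2 => by
        rcases hAc : A.contains i with _ | _
        · rfl
        · exfalso
          have h2' : i ≤ b1 - 1 := by omega
          have hiA : i ∈ A := List.contains_iff_mem.mp hAc
          have : i ∈ s := (hsmem i).mpr ⟨hiA, by omega, by omega⟩
          rw [hs] at this
          rcases List.mem_cons.mp this with h | h
          · omega
          · exact absurd (hpb i h) (by omega))
    rw [show (0 : Int) + 1 + (((b1 - 1).toNat : Nat) : Int) = b1 from by omega,
      show (0 : Int) + 1 = 1 from by norm_num] at hrun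
    have hcb1 : A.contains b1 = true := List.contains_iff_mem.mpr hb1.1
    rw [show stpA A ((PySem.List.pyRange 1 b1 1).foldl (stpA A) (0, 1)) b1
        = (((PySem.List.pyRange 1 b1 1).foldl (stpA A) (0, 1)).2, 0) from by
      rw [stpA, hcb1]; simp]
    rw [hrun]
    have hans : (0 * fibI (b1 - 1).toNat + 1 * fibI ((b1 - 1).toNat + 1)) % 1000000007
        = fibI ((b1 - 1).toNat + 1) % 1000000007 := by ring_nf
    rw [hans]
    rw [chain A N rest b1 (fibI ((b1 - 1).toNat + 1) % 1000000007) hpt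
      (fun b' hb' => ⟨hpb b' hb', ((hsmem b').mp (by rw [hs]; exact List.mem_cons_of_mem _ hb')).2.2⟩)
      (fun i h1 h2 => by
        have hi : A.contains i = true ↔ i ∈ s := by
          rw [List.contains_iff_mem, hsmem]
          constructor
          · exact fun h => ⟨h, by omega, h2⟩
          · exact fun h => h.1
        rw [hi, hs, List.mem_cons]
        constructor
        · rintro (h | h)
          · omega
          · exact h
        · exact fun h => Or.inr h)
      (by omega) (by omega)]
    rw [Bloop, fibPairB_eq, pyMOD_emod]
    rw [show b1.toNat = (b1 - 1).toNat + 1 from by omega, one_mul, Int.emod_emod_of_dvd _ dvd_rfl]
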